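-- pv_equiv track=rewrite | github.com/whateverthatis2/music-voting1 | api/lab3.py | _build_preference_matrix
-- ===== SOURCE A (Python) =====
-- def _build_preference_matrix(votes, leaders):
--     matrix = {}
--     for v in votes:
--         prefs = v.get('preferences', [])
--         # Для кожної пари в преференціях
--         for i in range(len(prefs)):
--             for j in range(i+1, len(prefs)):
--                 a, b = prefs[i], prefs[j]
--                 if a in leaders and b in leaders:
--                     matrix[(a, b)] = matrix.get((a, b), 0) + 1
--     return matrix
-- ===== SOURCE B (Python) =====
-- def _build_preference_matrix(votes, leaders):
--     leader_set = set(leaders)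
--     matrix = {}
--     for v in votes:
--         # keep only leader preferences, in order, then count every ordered pair
--         rest = [p for p in v.get('preferences', []) if p in leader_set]
--         while rest:
--             a = rest[0]
--             rest = rest[1:]
--             for b in rest:
--                 matrix[(a, b)] = matrix.get((a, b), 0) + 1
--     return matrix
-- ===== Notes on version B (the rewrite author's own statement) =====
-- stated objective: alternative
-- what changed: B filters each vote's preferences down to the leaders once (set membership) and counts pairs only within that filtered list via a head-against-tail pass, instead of A's double index loop over all preference pairs with a leaders-list membership test per pair.
import Mathlib
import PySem

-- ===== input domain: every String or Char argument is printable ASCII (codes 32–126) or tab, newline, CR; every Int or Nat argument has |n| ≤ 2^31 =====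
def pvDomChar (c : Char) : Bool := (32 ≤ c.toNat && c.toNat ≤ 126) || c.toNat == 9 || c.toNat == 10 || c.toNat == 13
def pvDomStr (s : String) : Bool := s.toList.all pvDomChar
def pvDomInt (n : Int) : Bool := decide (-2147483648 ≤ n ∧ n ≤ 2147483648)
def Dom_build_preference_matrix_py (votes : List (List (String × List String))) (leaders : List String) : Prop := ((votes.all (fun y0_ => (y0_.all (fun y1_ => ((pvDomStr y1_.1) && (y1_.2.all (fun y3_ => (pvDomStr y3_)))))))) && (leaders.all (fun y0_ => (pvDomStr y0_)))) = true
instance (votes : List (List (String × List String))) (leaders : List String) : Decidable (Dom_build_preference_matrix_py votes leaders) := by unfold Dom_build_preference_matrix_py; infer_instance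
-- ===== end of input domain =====

-- B pre-filters each vote's preference list to the leaders once (one set-membership pass)
-- and then counts only the pairs of that filtered list, instead of A's scan over ALL index
-- pairs with a leaders-list membership test on each pair.

-- ===== PORT A =====
def build_preference_matrix_py (votes : List (List (String × List String))) (leaders : List String) : List (String × String × Int) :=
  let matrix : PySem.Dict (String × String) Int :=
    votes.foldl (fun m v =>
      let prefs := (PySem.Dict.mk v).getD "preferences" []
      (PySem.List.pyRange 0 (prefs.length : Int) 1).foldl (fun m i =>
        (PySem.List.pyRange (i + 1) (prefs.length : Int) 1).foldl (fun m j =>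
          let a := PySem.List.pyGetD prefs i ""
          let b := PySem.List.pyGetD prefs j ""
          if a ∈ leaders ∧ b ∈ leaders then m.insert (a, b) (m.getD (a, b) 0 + 1) else m) m) m)
      PySem.Dict.empty
  matrix.items.map (fun p => (p.1.1, p.1.2, p.2))

-- ===== PORT B =====
-- Source B's 'while rest:' loop: take the head, bump every (head, later) pair, continue on the tail
def pvAddPairs (m : PySem.Dict (String × String) Int) : List String → PySem.Dict (String × String) Int
  | [] => m
  | a :: rest => pvAddPairs (rest.foldl (fun m b => m.insert (a, b) (m.getD (a, b) 0 + 1)) m) rest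

def build_preference_matrix_py_alt (votes : List (List (String × List String))) (leaders : List String) : List (String × String × Int) :=
  let lset : PySem.Set String := PySem.Set.ofList leaders
  let matrix : PySem.Dict (String × String) Int :=
    votes.foldl (fun m v =>
      let kept := ((PySem.Dict.mk v).getD "preferences" []).filter (fun p => PySem.Set.contains lset p)
      pvAddPairs m kept)
      PySem.Dict.empty
  matrix.items.map (fun p => (p.1.1, p.1.2, p.2))

-- ===== PRECONDITION & SPEC =====
def Spec_build_preference_matrix_py (votes : List (List (String × List String))) (leaders : List String) (out : List (String × String × Int)) : Prop := out = build_preference_matrix_py_alt votes leaders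
instance (votes : List (List (String × List String))) (leaders : List String) (out : List (String × String × Int)) : Decidable (Spec_build_preference_matrix_py votes leaders out) := by unfold Spec_build_preference_matrix_py; infer_instance

-- ===== CLAIM (what is proved, stated in full; the proofs are below) =====
def Claim_equal_build_preference_matrix_py : Prop := ∀ (votes : List (List (String × List String))) (leaders : List String), Dom_build_preference_matrix_py votes leaders → Spec_build_preference_matrix_py votes leaders (build_preference_matrix_py votes leaders)

-- ===== LEMMAS AND PROOFS =====

-- A's double index loop over one vote's prefs, re-stated on List.range / List.drop
lemma pv_inner_drop (leaders : List String) (prefs : List String)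
    (m : PySem.Dict (String × String) Int) :
    (PySem.List.pyRange 0 (prefs.length : Int) 1).foldl (fun m i =>
        (PySem.List.pyRange (i + 1) (prefs.length : Int) 1).foldl (fun m j =>
          let a := PySem.List.pyGetD prefs i ""
          let b := PySem.List.pyGetD prefs j ""
          if a ∈ leaders ∧ b ∈ leaders then m.insert (a, b) (m.getD (a, b) 0 + 1) else m) m) m
    = (List.range prefs.length).foldl (fun m k =>
        (prefs.drop (k + 1)).foldl (fun m b =>
          if prefs.getD k "" ∈ leaders ∧ b ∈ leaders then
            m.insert (prefs.getD k "", b) (m.getD (prefs.getD k "", b) 0 + 1) else m) m) m := by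
  rw [PySem.List.pyRange_one, List.foldl_map]
  simp only [Int.sub_zero, Int.toNat_natCast, Int.zero_add]
  apply PySem.List.foldl_congr_mem
  intro acc k hk
  rw [List.mem_range] at hk
  rw [show ((k : Int) + 1) = ((k + 1 : Nat) : Int) by push_cast; ring]
  rw [PySem.List.foldl_pyRange_pyGetD' prefs ""
      (f := fun m b => if PySem.List.pyGetD prefs (↑k) "" ∈ leaders ∧ b ∈ leaders then
          m.insert (PySem.List.pyGetD prefs (↑k) "", b)
            (m.getD (PySem.List.pyGetD prefs (↑k) "", b) 0 + 1) else m)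
      acc (by positivity)]
  simp [PySem.List.pyGetD_natCast]

-- the range/drop double loop is exactly B's pair loop on the filtered list
lemma pv_drop_pairs (leaders : List String) : ∀ (prefs : List String)
    (m : PySem.Dict (String × String) Int),
    (List.range prefs.length).foldl (fun m k =>
        (prefs.drop (k + 1)).foldl (fun m b =>
          if prefs.getD k "" ∈ leaders ∧ b ∈ leaders then
            m.insert (prefs.getD k "", b) (m.getD (prefs.getD k "", b) 0 + 1) else m) m) m
    = pvAddPairs m (prefs.filter (fun p => PySem.Set.contains (PySem.Set.ofList leaders) p)) := by
  intro prefs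
  induction prefs with
  | nil => intro m; simp [pvAddPairs]
  | cons p rest ih =>
    intro m
    rw [List.length_cons, List.range_succ_eq_map, List.foldl_cons, List.foldl_map]
    simp only [List.drop_succ_cons, List.getD_cons_succ, List.getD_cons_zero, List.drop_zero,
      Nat.succ_eq_add_one]
    rw [ih]
    by_cases hp : p ∈ leaders
    · rw [List.filter_cons_of_pos (by simp [hp])]
      rw [pvAddPairs]
      congr 1
      have he : (fun (m : PySem.Dict (String × String) Int) b =>
          if p ∈ leaders ∧ b ∈ leaders then m.insert (p, b) (m.getD (p, b) 0 + 1) else m)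
          = fun m b => if b ∈ leaders then m.insert (p, b) (m.getD (p, b) 0 + 1) else m := by
        funext m b; simp [hp]
      rw [he, PySem.List.foldl_ite_eq_foldl_filter (fun b : String => b ∈ leaders)
        (fun (m : PySem.Dict (String × String) Int) b =>
          m.insert (p, b) (m.getD (p, b) 0 + 1)) rest m]
      congr 1
      apply List.filter_congr
      intro b _; simp [PySem.Set.mem_ofList]
    · rw [List.filter_cons_of_neg (by simp [hp])]
      congr 1
      simp [hp]

-- ===== VERDICT (by name: the statement is the Claim_ definition above) =====
theorem build_preference_matrix_py_spec : Claim_equal_build_preference_matrix_py := by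
  intro votes leaders _
  unfold Spec_build_preference_matrix_py build_preference_matrix_py build_preference_matrix_py_alt
  dsimp only
  congr 1
  congr 1
  apply PySem.List.foldl_congr_mem
  intro m v _
  dsimp only
  rw [pv_inner_drop, pv_drop_pairs]
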